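-- pv_equiv track=rewrite | github.com/AlbaranezJavier/M3DbVA | TFG_Python/myTools/my_orientation_tool.py | is_correct_for_ransac
-- ===== SOURCE A (Python) =====
-- def is_correct_for_ransac(patternsY):
--     '''
--     Comprueba que este vector sea correcto para el algoritmo RANSAC.
--     Devuelve false si más de la mitad de los valores son iguales, true en caso contrario.
--     '''
--     dict = {}
--     max = 1
--     for elem in patternsY:
--         if elem not in dict:
--             dict.update({elem: 1})
--         else:
--             dict[elem] += 1
--             if dict[elem] > max:
--                 max = dict[elem]
--     return False if max > len(patternsY)//2 else True
-- ===== SOURCE B (Python) =====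
-- def is_correct_for_ransac(patternsY):
--     # Boyer-Moore majority vote: single-pass candidate selection, then verify.
--     cand, cnt = None, 0
--     for e in patternsY:
--         if cnt == 0:
--             cand, cnt = e, 1
--         elif e == cand:
--             cnt += 1
--         else:
--             cnt -= 1
--     occ = sum(1 for e in patternsY if e == cand)
--     return occ <= len(patternsY) // 2
-- ===== Notes on version B (the rewrite author's own statement) =====
-- stated objective: alternative
-- what changed: Replaces the dict-of-counts with running maximum by Boyer-Moore majority voting (one candidate/counter pass plus a verification count): O(1) extra space and no per-element hashing/dict updates.
-- intended difference: On the empty vector A returns False because of its 'max = 1' initialisation, while B returns True, the intended value since no value occupies a majority of an empty vector. — e.g. on is_correct_for_ransac([]): A returns false, B returns true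
import Mathlib
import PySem

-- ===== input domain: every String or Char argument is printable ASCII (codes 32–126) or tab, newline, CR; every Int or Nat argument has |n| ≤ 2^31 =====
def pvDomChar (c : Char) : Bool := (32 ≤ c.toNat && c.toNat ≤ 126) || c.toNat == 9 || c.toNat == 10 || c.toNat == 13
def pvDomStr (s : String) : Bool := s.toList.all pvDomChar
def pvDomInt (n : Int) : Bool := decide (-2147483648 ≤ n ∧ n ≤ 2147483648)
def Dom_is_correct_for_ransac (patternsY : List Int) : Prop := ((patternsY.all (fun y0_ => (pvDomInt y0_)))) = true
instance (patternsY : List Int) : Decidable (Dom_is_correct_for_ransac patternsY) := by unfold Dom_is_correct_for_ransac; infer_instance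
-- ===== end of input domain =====

-- B replaces A's dict-of-counts with running maximum by Boyer-Moore majority voting
-- (alternative decomposition, O(1) extra space); on the empty vector A returns False
-- (its 'max = 1' initialisation) while B returns True — stated below as D_.

-- ===== PORT A =====
def aStep (st : PySem.Dict Int Int × Int) (elem : Int) : PySem.Dict Int Int × Int :=
  if ¬ (st.1.contains elem) then
    (st.1.insert elem 1, st.2)
  else
    let d := st.1.modify elem 0 (· + 1)
    let v := d.getD elem 0
    (d, if v > st.2 then v else st.2)

def is_correct_for_ransac (patternsY : List Int) : Bool :=
  let st := patternsY.foldl aStep (PySem.Dict.empty, 1)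
  if st.2 > PySem.Int.floordiv (patternsY.length : Int) 2 then false else true

-- ===== PORT B =====
def bmStep (st : Option Int × Int) (e : Int) : Option Int × Int :=
  if st.2 = 0 then (some e, 1)
  else if some e = st.1 then (st.1, st.2 + 1)
  else (st.1, st.2 - 1)

def is_correct_for_ransac_alt (patternsY : List Int) : Bool :=
  let st := patternsY.foldl bmStep (none, 0)
  let occ : Int := (patternsY.filter (fun e => some e == st.1)).length
  decide (occ ≤ PySem.Int.floordiv (patternsY.length : Int) 2)

-- ===== PRECONDITION & SPEC =====
-- On the empty vector A returns False (artefact of initialising max to 1); B returns True,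
-- the intended value: no value occupies a majority of an empty vector.
def D_is_correct_for_ransac (patternsY : List Int) : Prop := patternsY = []
instance (patternsY : List Int) : Decidable (D_is_correct_for_ransac patternsY) := by
  unfold D_is_correct_for_ransac; infer_instance

def Spec_is_correct_for_ransac (patternsY : List Int) (out : Bool) : Prop :=
  ¬ D_is_correct_for_ransac patternsY → out = is_correct_for_ransac_alt patternsY
instance (patternsY : List Int) (out : Bool) : Decidable (Spec_is_correct_for_ransac patternsY out) := by
  unfold Spec_is_correct_for_ransac; infer_instance

def pvDiffWitness_is_correct_for_ransac : List Int := []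
def pvDiffWitnessOut_is_correct_for_ransac : Bool × Bool := (false, true)

-- ===== CLAIM (what is proved, stated in full; the proofs are below) =====
def Claim_unchanged_is_correct_for_ransac : Prop := ∀ (patternsY : List Int), Dom_is_correct_for_ransac patternsY → Spec_is_correct_for_ransac patternsY (is_correct_for_ransac patternsY)
def Claim_changed_is_correct_for_ransac : Prop := Dom_is_correct_for_ransac (pvDiffWitness_is_correct_for_ransac) ∧ D_is_correct_for_ransac (pvDiffWitness_is_correct_for_ransac) ∧ is_correct_for_ransac (pvDiffWitness_is_correct_for_ransac) = pvDiffWitnessOut_is_correct_for_ransac.1 ∧ is_correct_for_ransac_alt (pvDiffWitness_is_correct_for_ransac) = pvDiffWitnessOut_is_correct_for_ransac.2 ∧ pvDiffWitnessOut_is_correct_for_ransac.1 ≠ pvDiffWitnessOut_is_correct_for_ransac.2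
def Claim_exact_is_correct_for_ransac : Prop := ∀ (patternsY : List Int), Dom_is_correct_for_ransac patternsY → D_is_correct_for_ransac patternsY → is_correct_for_ransac patternsY ≠ is_correct_for_ransac_alt patternsY

-- ===== LEMMAS AND PROOFS =====

-- A's loop invariant: the dict holds the counts of the processed prefix p, and the running
-- maximum m satisfies, for every threshold k ≥ 1: m > k iff some value's count exceeds k.
lemma A_loop (l : List Int) : ∀ (p : List Int) (d : PySem.Dict Int Int) (m : Int),
    (∀ x, d.getD x 0 = (p.count x : Int)) →
    (∀ x, d.contains x = decide (x ∈ p)) →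
    1 ≤ m →
    (∀ k : Int, 1 ≤ k → (m > k ↔ ∃ x ∈ p, (p.count x : Int) > k)) →
    1 ≤ (l.foldl aStep (d, m)).2 ∧
      ∀ k : Int, 1 ≤ k →
        ((l.foldl aStep (d, m)).2 > k ↔ ∃ x ∈ p ++ l, ((p ++ l).count x : Int) > k) := by
  induction l with
  | nil =>
    intro p d m hd hc hm hk
    simpa using ⟨hm, hk⟩
  | cons e l ih =>
    intro p d m hd hc hm hk
    have step : aStep (d, m) e =
        if ¬ d.contains e then (d.insert e 1, m)
        else
          let d' := d.modify e 0 (· + 1)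
          (d', if d'.getD e 0 > m then d'.getD e 0 else m) := rfl
    have hassoc : p ++ e :: l = (p ++ [e]) ++ l := by simp
    rw [hassoc]
    by_cases hmem : e ∈ p
    · -- elem already present: its count is bumped, the max is possibly updated
      have hcont : d.contains e = true := by rw [hc]; simp [hmem]
      have hde : d.getD e 0 = (p.count e : Int) := hd e
      have hfold : (e :: l).foldl aStep (d, m) =
          l.foldl aStep (d.modify e 0 (· + 1),
            if (d.getD e 0 + 1) > m then (d.getD e 0 + 1) else m) := by
        simp [List.foldl, step, hcont, PySem.Dict.getD_modify_self]
      rw [hfold]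
      apply ih (p ++ [e])
      · intro x
        rcases eq_or_ne x e with rfl | hxe
        · simp [PySem.Dict.getD_modify_self, hd x, List.count_append]
        · rw [PySem.Dict.getD_modify]
          simp [hxe, Ne.symm hxe, hd x, List.count_append, List.count_singleton]
      · intro x
        rw [PySem.Dict.contains_modify, hc]
        rcases eq_or_ne x e with rfl | hxe
        · by_cases hx : x ∈ p <;> simp [hx]
        · by_cases hx : x ∈ p <;> simp [hx, hxe, Ne.symm hxe]
      · split <;> omega
      · intro k hk1
        constructor
        · intro hgt
          by_cases hcmp : (p.count e : Int) + 1 > k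
          · refine ⟨e, by simp, ?_⟩
            have hce : (p ++ [e]).count e = p.count e + 1 := by
              simp [List.count_append]
            rw [hce]; push_cast; omega
          · rw [hde] at hgt
            have hmk : m > k := by split at hgt <;> omega
            obtain ⟨x, hxp, hxc⟩ := (hk k hk1).1 hmk
            refine ⟨x, by simp [hxp], ?_⟩
            have : p.count x ≤ (p ++ [e]).count x := by
              simp [List.count_append]
            omega
        · rintro ⟨x, hxp, hxc⟩
          rw [hde]
          rcases eq_or_ne x e with rfl | hxe
          · have hce : (p ++ [x]).count x = p.count x + 1 := by
              simp [List.count_append]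
            rw [hce] at hxc; push_cast at hxc
            split <;> omega
          · have hxp' : x ∈ p := by
              rcases List.mem_append.1 hxp with h | h
              · exact h
              · simp at h; exact absurd h hxe
            have hce : (p ++ [e]).count x = p.count x := by
              simp [List.count_append, List.count_singleton, hxe, Ne.symm hxe]
            rw [hce] at hxc
            have hmk : m > k := (hk k hk1).2 ⟨x, hxp', hxc⟩
            split <;> omega
    · -- fresh elem: inserted with count 1, the max is unchanged
      have hcont : d.contains e = false := by rw [hc]; simp [hmem]
      have hfold : (e :: l).foldl aStep (d, m) =
          l.foldl aStep (d.insert e 1, m) := by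
        simp [List.foldl, step, hcont]
      rw [hfold]
      have hpe : p.count e = 0 := List.count_eq_zero.2 hmem
      apply ih (p ++ [e])
      · intro x
        rcases eq_or_ne x e with rfl | hxe
        · rw [PySem.Dict.getD_insert_self]
          simp [List.count_append, hpe]
        · rw [PySem.Dict.getD_insert]
          simp [hxe, Ne.symm hxe, hd x, List.count_append, List.count_singleton]
      · intro x
        rw [PySem.Dict.contains_insert, hc]
        rcases eq_or_ne x e with rfl | hxe
        · by_cases hx : x ∈ p <;> simp [hx]
        · by_cases hx : x ∈ p <;> simp [hx, hxe, Ne.symm hxe]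
      · exact hm
      · intro k hk1
        rw [hk k hk1]
        constructor
        · rintro ⟨x, hxp, hxc⟩
          refine ⟨x, by simp [hxp], ?_⟩
          have : p.count x ≤ (p ++ [e]).count x := by simp [List.count_append]
          omega
        · rintro ⟨x, hxp, hxc⟩
          rcases eq_or_ne x e with rfl | hxe
          · have hce : (p ++ [x]).count x = 1 := by
              simp [List.count_append, hpe]
            rw [hce] at hxc; norm_num at hxc; omega
          · have hxp' : x ∈ p := by
              rcases List.mem_append.1 hxp with h | h
              · exact h
              · simp at h; exact absurd h hxe
            have hce : (p ++ [e]).count x = p.count x := by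
              simp [List.count_append, List.count_singleton, hxe, Ne.symm hxe]
            rw [hce] at hxc
            exact ⟨x, hxp', hxc⟩

-- Boyer-Moore invariant: the counter stays within bounds, every non-candidate value
-- occupies at most half of (processed length minus counter), and the candidate at most
-- half of (processed length plus counter).
lemma BM_loop (l : List Int) : ∀ (p : List Int) (cand : Option Int) (cnt : Int),
    0 ≤ cnt → cnt ≤ (p.length : Int) →
    (∀ x : Int, some x ≠ cand → 2 * (p.count x : Int) ≤ (p.length : Int) - cnt) →
    (∀ x : Int, some x = cand → 2 * (p.count x : Int) ≤ (p.length : Int) + cnt) →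
    0 ≤ (l.foldl bmStep (cand, cnt)).2 ∧
    (∀ x : Int, some x ≠ (l.foldl bmStep (cand, cnt)).1 →
      2 * ((p ++ l).count x : Int) ≤ ((p ++ l).length : Int) - (l.foldl bmStep (cand, cnt)).2) := by
  induction l with
  | nil =>
    intro p cand cnt h0 h1 h2 h3
    simpa using ⟨h0, h2⟩
  | cons e l ih =>
    intro p cand cnt h0 h1 h2 h3
    have hassoc : p ++ e :: l = (p ++ [e]) ++ l := by simp
    rw [hassoc]
    have hcnt : ∀ x : Int, (p ++ [e]).count x =
        p.count x + (if x = e then 1 else 0) := by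
      intro x
      rcases eq_or_ne x e with rfl | hxe
      · simp [List.count_append]
      · simp [List.count_append, hxe, Ne.symm hxe]
    by_cases hz : cnt = 0
    · -- counter exhausted: e becomes the new candidate with count 1
      have hfold : (e :: l).foldl bmStep (cand, cnt) = l.foldl bmStep (some e, 1) := by
        simp [List.foldl, bmStep, hz]
      rw [hfold]
      apply ih (p ++ [e]) (some e) 1
      · omega
      · simp
      · intro x hx
        have hxe : x ≠ e := fun h => hx (by rw [h])
        rw [hcnt x]
        simp only [hxe, if_false]
        rcases eq_or_ne (some x) cand with h | h
        · have := h3 x h; simp; omega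
        · have := h2 x h; simp; omega
      · intro x hx
        have hxe : x = e := by injection hx
        subst hxe
        rw [hcnt x]
        rcases eq_or_ne (some x) cand with h | h
        · have := h3 x h; simp; omega
        · have := h2 x h; simp; omega
    · by_cases hce : some e = cand
      · -- e votes for the candidate
        have hfold : (e :: l).foldl bmStep (cand, cnt) =
            l.foldl bmStep (cand, cnt + 1) := by
          simp [List.foldl, bmStep, hz, hce]
        rw [hfold]
        apply ih (p ++ [e]) cand (cnt + 1)
        · omega
        · simp; omega
        · intro x hx
          have hxe : x ≠ e := fun h => hx (by rw [h]; exact hce)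
          rw [hcnt x]
          have := h2 x hx
          simp [hxe]; omega
        · intro x hx
          rw [hcnt x]
          have := h3 x hx
          split <;> (simp; omega)
      · -- e votes against the candidate
        have hfold : (e :: l).foldl bmStep (cand, cnt) =
            l.foldl bmStep (cand, cnt - 1) := by
          simp [List.foldl, bmStep, hz, hce]
        rw [hfold]
        apply ih (p ++ [e]) cand (cnt - 1)
        · omega
        · simp; omega
        · intro x hx
          rw [hcnt x]
          have := h2 x hx
          split <;> (simp; omega)
        · intro x hx
          have hxe : x ≠ e := by
            intro h; rw [← h] at hce; exact hce hx
          rw [hcnt x]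
          have := h3 x hx
          simp [hxe]; omega

-- the verification count in B is the true count of the candidate
lemma occ_eq (l : List Int) (c : Option Int) :
    (l.filter (fun e => some e == c)).length =
      (match c with | none => 0 | some v => l.count v) := by
  cases c with
  | none => simp
  | some v =>
    have : (l.filter (fun e => some e == some v)) = l.filter (fun e => e == v) := by
      apply List.filter_congr; intro a _; simp
    rw [this]; simp [List.count_eq_length_filter]

theorem is_correct_for_ransac_spec : Claim_unchanged_is_correct_for_ransac := by
  intro l _ hD
  have hne : l ≠ [] := hD
  have hn1 : 1 ≤ l.length := List.length_pos_iff.2 hne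
  -- A's side: characterise the final running maximum
  obtain ⟨hA1, hA2⟩ := A_loop l [] PySem.Dict.empty 1
    (by intro x; simp [PySem.Dict.getD_empty])
    (by intro x; simp [PySem.Dict.contains_empty])
    le_rfl
    (by intro k hk; simp; omega)
  simp only [List.nil_append] at hA2
  -- B's side: the Boyer-Moore invariant
  obtain ⟨hB0, hB2⟩ := BM_loop l [] none 0
    (le_rfl) (by simp) (by intro x _; simp) (by intro x h; cases h)
  simp only [List.nil_append] at hB2
  set st := l.foldl bmStep (none, 0) with hst
  set m := (l.foldl aStep (PySem.Dict.empty, 1)).2 with hm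
  set n := l.length with hn
  set k := n / 2 with hk
  -- both programs compare against ⌊n/2⌋
  have hfd : PySem.Int.floordiv (n : Int) 2 = (k : Int) := by
    simp [hk]
  have hocc : ((l.filter (fun e => some e == st.1)).length : Int) =
      (match st.1 with | none => 0 | some v => (l.count v : Int)) := by
    rw [occ_eq]; cases st.1 <;> simp
  -- key equivalence: max-count exceeds k iff the verified candidate count does
  have hiff : (m > (k : Int)) ↔
      ((match st.1 with | none => 0 | some v => (l.count v : Int)) > (k : Int)) := by
    rcases Nat.eq_or_lt_of_le hn1 with h1 | h2
    · -- n = 1: a singleton list, both sides are direct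
      obtain ⟨x, hx⟩ : ∃ x, l = [x] := by
        cases l with
        | nil => exact absurd rfl hne
        | cons a t =>
          cases t with
          | nil => exact ⟨a, rfl⟩
          | cons b t' => simp [hn] at h1
      subst hx
      have hk0 : k = 0 := by simp [hk, hn]
      have hm1 : m = 1 := by
        simp [hm, List.foldl, aStep, PySem.Dict.contains_empty]
      have hst1 : st.1 = some x := by
        simp [hst, List.foldl, bmStep]
      rw [hk0, hm1, hst1]
      simp
    · -- n ≥ 2, so k ≥ 1 and A's invariant applies at threshold k
      have hk1 : (1 : Int) ≤ (k : Int) := by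
        have : 1 ≤ k := by omega
        exact_mod_cast this
      rw [hA2 (k : Int) hk1]
      constructor
      · rintro ⟨x, hxl, hxc⟩
        -- x is a strict majority, so Boyer-Moore must have elected it
        have hmaj : 2 * (l.count x : Int) > (n : Int) := by
          have h2k : 2 * k + 1 ≥ n := by omega
          have : (l.count x : Int) ≥ (k : Int) + 1 := by omega
          push_cast at h2k ⊢
          omega
        have hcx : st.1 = some x := by
          by_contra hcon
          have := hB2 x (fun h => hcon h.symm)
          omega
        rw [hcx]
        simp only []
        omega
      · intro hgt
        cases hcs : st.1 with
        | none => rw [hcs] at hgt; simp at hgt; omega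
        | some v =>
          rw [hcs] at hgt
          have hgt' : ((l.count v : Int)) > (k : Int) := hgt
          refine ⟨v, ?_, hgt'⟩
          have hpos : 0 < l.count v := by
            by_contra hc0
            have hv0 : l.count v = 0 := by omega
            rw [hv0] at hgt'
            simp at hgt'
            omega
          exact List.count_pos_iff.1 hpos
  -- assemble the booleans
  show (if m > PySem.Int.floordiv ((l.length : Nat) : Int) 2 then false else true) =
      decide (((l.filter (fun e => some e == st.1)).length : Int) ≤
        PySem.Int.floordiv ((l.length : Nat) : Int) 2)
  rw [← hn, hfd, hocc]
  by_cases hcase : m > (k : Int)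
  · have := hiff.1 hcase
    simp [hcase]; omega
  · have := mt hiff.2 hcase
    simp [hcase]; omega

theorem is_correct_for_ransac_changed : Claim_changed_is_correct_for_ransac := by
  unfold Claim_changed_is_correct_for_ransac; decide

theorem is_correct_for_ransac_tight : Claim_exact_is_correct_for_ransac := by
  intro l _ hD
  subst hD
  decide
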